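-- pv_equiv track=rewrite | github.com/shawwn/npnd | src/npnd/_src/ops/gather_nd.py | getAffineRavelIndexExpr
-- ===== SOURCE A (Python) =====
-- def getAffineRavelIndexExpr(shape, exprs):
--   # uint64_t prod = 1;
--   prod = 1
--   # mlir::AffineExpr linearIndex = rewriter.getAffineConstantExpr(0);
--   linearIndex = 0
--   # for (unsigned i = shape.size(); i-- > 0;) {
--   for i in range(len(shape) - 1, -1, -1):
--     # if (i + 1 < shape.size()) {
--     #   prod *= shape[i + 1];
--     # }
--     if i + 1 < len(shape):
--       prod *= shape[i + 1]
--     # linearIndex = exprs[i] * prod + linearIndex;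
--     linearIndex = exprs[i] * prod + linearIndex
--   # }
--   #
--   # return linearIndex;
--   return linearIndex
-- ===== SOURCE B (Python) =====
-- def getAffineRavelIndexExpr(shape, exprs):
--   # Pass 1: build the strides table (stride[i] = product of shape[i+1:]).
--   strides = []
--   p = 1
--   for s in reversed(shape):
--     strides.append(p)
--     p *= s
--   strides.reverse()
--   # Pass 2: flat dot product.
--   return sum(e * s for e, s in zip(exprs, strides))
-- ===== Notes on version B (the rewrite author's own statement) =====
-- stated objective: alternative
-- what changed: A's single fused backward Horner-style loop (running product carried with the accumulator) is replaced by two flat passes: first build an explicit strides table by a reversed prefix-product sweep, then return the dot product of exprs with that table via zip/sum.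
import Mathlib
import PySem

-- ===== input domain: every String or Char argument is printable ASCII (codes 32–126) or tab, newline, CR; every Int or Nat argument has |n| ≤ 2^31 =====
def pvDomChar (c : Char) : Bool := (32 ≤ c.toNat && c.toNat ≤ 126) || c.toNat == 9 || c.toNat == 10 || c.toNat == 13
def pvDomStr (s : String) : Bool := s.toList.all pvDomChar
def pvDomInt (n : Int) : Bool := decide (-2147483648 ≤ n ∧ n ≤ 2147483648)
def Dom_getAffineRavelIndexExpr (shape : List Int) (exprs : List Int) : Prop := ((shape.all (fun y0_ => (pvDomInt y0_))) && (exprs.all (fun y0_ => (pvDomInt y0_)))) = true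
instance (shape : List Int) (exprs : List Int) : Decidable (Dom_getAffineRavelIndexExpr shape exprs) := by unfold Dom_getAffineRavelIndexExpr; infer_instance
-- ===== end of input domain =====

-- B replaces A's fused backward Horner loop by a strides-table pass plus a flat dot-product pass (alternative decomposition, same cost).

-- ===== PORT A =====
-- literal port of A: backward index loop carrying (prod, linearIndex)
def getAffineRavelIndexExpr (shape : List Int) (exprs : List Int) : Int :=
  ((PySem.List.pyRange ((shape.length : Int) - 1) (-1) (-1)).foldl
    (fun (st : Int × Int) i =>
      let prod := if i + 1 < (shape.length : Int) then st.1 * PySem.List.pyGetD shape (i + 1) 0 else st.1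
      (prod, PySem.List.pyGetD exprs i 0 * prod + st.2))
    (1, 0)).2

-- ===== PORT B =====
-- literal port of B: build strides by a reversed prefix-product sweep, then dot-product exprs with it
def getAffineRavelIndexExpr_alt (shape : List Int) (exprs : List Int) : Int :=
  let st := shape.reverse.foldl (fun (ps : Int × List Int) s => (ps.1 * s, ps.2 ++ [ps.1])) (1, [])
  let strides := st.2.reverse
  (exprs.zip strides).foldl (fun acc es => acc + es.1 * es.2) 0

-- ===== PRECONDITION & SPEC =====
-- Pre_ excludes exactly the inputs where A raises IndexError: exprs shorter than shape.
def Pre_getAffineRavelIndexExpr (shape : List Int) (exprs : List Int) : Prop :=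
  shape.length ≤ exprs.length
instance (shape : List Int) (exprs : List Int) : Decidable (Pre_getAffineRavelIndexExpr shape exprs) := by unfold Pre_getAffineRavelIndexExpr; infer_instance

def pvWitness_getAffineRavelIndexExpr : List Int × List Int := ([2, 3], [1, 2])

def Spec_getAffineRavelIndexExpr (shape : List Int) (exprs : List Int) (out : Int) : Prop := out = getAffineRavelIndexExpr_alt shape exprs
instance (shape : List Int) (exprs : List Int) (out : Int) : Decidable (Spec_getAffineRavelIndexExpr shape exprs out) := by unfold Spec_getAffineRavelIndexExpr; infer_instance

-- ===== CLAIM (what is proved, stated in full; the proofs are below) =====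
def Claim_equal_getAffineRavelIndexExpr : Prop := ∀ (shape : List Int) (exprs : List Int), Dom_getAffineRavelIndexExpr shape exprs → Pre_getAffineRavelIndexExpr shape exprs → Spec_getAffineRavelIndexExpr shape exprs (getAffineRavelIndexExpr shape exprs)

-- ===== LEMMAS AND PROOFS =====

-- the intended strides table: stridesFn shape = [prod shape[1:], prod shape[2:], …, 1]
def stridesFn : List Int → List Int
  | [] => []
  | _ :: ss => ss.prod :: stridesFn ss

-- the intended dot product (truncating, like zip)
def dotList : List Int → List Int → Int
  | e :: es, t :: ts => e * t + dotList es ts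
  | _, _ => 0

-- partial sums of A's loop: indices 0 .. k-1
def partSum (shape exprs : List Int) : Nat → Int
  | 0 => 0
  | k + 1 => partSum shape exprs k + exprs.getD k 0 * (shape.drop (k + 1)).prod

-- B side, lemma 1: first component of the sweep is the running product
theorem b_fold_fst (l : List Int) : ∀ (p : Int) (acc : List Int),
    (l.foldl (fun (ps : Int × List Int) s => (ps.1 * s, ps.2 ++ [ps.1])) (p, acc)).1 = p * l.prod := by
  induction l with
  | nil => intro p acc; simp
  | cons s ss ih => intro p acc; simp [List.foldl_cons, ih, mul_assoc]

-- B side, lemma 2: the reversed sweep output is exactly stridesFn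
theorem b_strides_eq (shape : List Int) :
    (shape.reverse.foldl (fun (ps : Int × List Int) s => (ps.1 * s, ps.2 ++ [ps.1])) (1, [])).2.reverse
      = stridesFn shape := by
  induction shape with
  | nil => simp [stridesFn]
  | cons s ss ih =>
    rw [stridesFn, List.reverse_cons, List.foldl_append]
    simp only [List.foldl_cons, List.foldl_nil, List.reverse_append, List.reverse_cons,
      List.reverse_nil, List.nil_append, List.cons_append, b_fold_fst, one_mul,
      List.prod_reverse]
    rw [ih]

-- B side, lemma 3: the zip fold is dotList
theorem b_zip_fold (es : List Int) : ∀ (ts : List Int) (c : Int),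
    ((es.zip ts).foldl (fun acc (p : Int × Int) => acc + p.1 * p.2) c) = c + dotList es ts := by
  induction es with
  | nil => intro ts c; simp [dotList]
  | cons e es ih =>
    intro ts c
    cases ts with
    | nil => simp [dotList]
    | cons t ts => simp [List.zip_cons_cons, List.foldl_cons, ih, dotList]; ring

-- A side: loop invariant — folding indices k-1 … 0 with prod = prod shape[k+1:] adds partSum k
theorem a_fold_inv (shape exprs : List Int) : ∀ (k : Nat), k ≤ shape.length → ∀ (L : Int),
    ((PySem.List.pyRange ((k : Int) - 1) (-1) (-1)).foldl
      (fun (st : Int × Int) i =>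
        let prod := if i + 1 < (shape.length : Int) then st.1 * PySem.List.pyGetD shape (i + 1) 0 else st.1
        (prod, PySem.List.pyGetD exprs i 0 * prod + st.2))
      ((shape.drop (k + 1)).prod, L)).2 = partSum shape exprs k + L := by
  intro k
  induction k with
  | zero =>
    intro _ L
    rw [PySem.List.pyRange_neg_one_eq_nil (by norm_num)]
    simp [partSum]
  | succ k ih =>
    intro hk L
    have hk' : k ≤ shape.length := Nat.le_of_succ_le hk
    rw [show ((k + 1 : Nat) : Int) - 1 = (k : Int) by push_cast; ring,
        PySem.List.pyRange_neg_one_cons (by have := Int.natCast_nonneg k; omega)]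
    rw [List.foldl_cons]
    have hprod : (if (k : Int) + 1 < (shape.length : Int)
        then (shape.drop (k + 1 + 1)).prod * PySem.List.pyGetD shape ((k : Int) + 1) 0
        else (shape.drop (k + 1 + 1)).prod) = (shape.drop (k + 1)).prod := by
      by_cases h : k + 1 < shape.length
      · rw [if_pos (by exact_mod_cast h)]
        have : PySem.List.pyGetD shape ((k : Int) + 1) 0 = shape[k + 1]'h := by
          rw [show ((k : Int) + 1) = ((k + 1 : Nat) : Int) by push_cast; ring,
              PySem.List.pyGetD_natCast, List.getD_eq_getElem?_getD, List.getElem?_eq_getElem h]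
          rfl
        rw [this, List.drop_eq_getElem_cons h, List.prod_cons, mul_comm]
      · rw [if_neg (by exact_mod_cast h)]
        have h1 : shape.length ≤ k + 1 := Nat.le_of_not_lt h
        rw [List.drop_eq_nil_of_le (by omega), List.drop_eq_nil_of_le (by omega)]
    simp only [hprod]
    have hE : PySem.List.pyGetD exprs ((k : Int)) 0 = exprs.getD k 0 := PySem.List.pyGetD_natCast ..
    rw [hE] at *
    rw [ih hk' (exprs.getD k 0 * (shape.drop (k + 1)).prod + L), partSum]
    ring

-- A equals partSum over the whole shape
theorem a_eq_partSum (shape exprs : List Int) :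
    getAffineRavelIndexExpr shape exprs = partSum shape exprs shape.length := by
  have h := a_fold_inv shape exprs shape.length (le_refl _) 0
  rw [List.drop_eq_nil_of_le (by omega)] at h
  unfold getAffineRavelIndexExpr
  simp only [List.prod_nil] at h
  rw [h, add_zero]

-- index shift for partSum over a cons pair
theorem partSum_cons (s : Int) (ss : List Int) (e : Int) (es : List Int) : ∀ (k : Nat),
    partSum (s :: ss) (e :: es) (k + 1) = e * ss.prod + partSum ss es k := by
  intro k
  induction k with
  | zero => simp [partSum]
  | succ k ih =>
    rw [show k + 1 + 1 = (k + 1) + 1 from rfl, partSum, ih, partSum]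
    simp only [List.getD_cons_succ, List.drop_succ_cons]
    ring

-- bridge: partSum over the full length is the dot product with the strides table
theorem partSum_eq_dot (shape : List Int) : ∀ (exprs : List Int),
    shape.length ≤ exprs.length →
    partSum shape exprs shape.length = dotList exprs (stridesFn shape) := by
  induction shape with
  | nil =>
    intro exprs _
    cases exprs <;> simp [partSum, stridesFn, dotList]
  | cons s ss ih =>
    intro exprs h
    cases exprs with
    | nil => simp at h
    | cons e es =>
      simp only [List.length_cons] at h
      rw [List.length_cons, partSum_cons, ih es (by omega), stridesFn, dotList]

-- B equals the same dot product
theorem b_eq_dot (shape exprs : List Int) :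
    getAffineRavelIndexExpr_alt shape exprs = dotList exprs (stridesFn shape) := by
  unfold getAffineRavelIndexExpr_alt
  simp only [b_strides_eq, b_zip_fold, zero_add]

-- ===== VERDICT (by name: the statement is the Claim_ definition above) =====
theorem getAffineRavelIndexExpr_spec : Claim_equal_getAffineRavelIndexExpr := by
  intro shape exprs _ hpre
  unfold Spec_getAffineRavelIndexExpr
  rw [a_eq_partSum, b_eq_dot, partSum_eq_dot shape exprs hpre]
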